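-- pv_equiv track=rewrite | github.com/mkilijanek/evilwaf | core/interceptor.py | _asterisk_forms
-- ===== SOURCE A (Python) =====
-- from typing import Any, Callable, Dict, List, Optional, Tuple
--
-- def _asterisk_forms(hostname: str) -> List[str]:
--     if not hostname:
--         return ["*"]
--     parts = hostname.split(".")
--     forms = [hostname]
--     for i in range(1, len(parts)):
--         forms.append("*." + ".".join(parts[i:]))
--     forms.append("*")
--     return forms
-- ===== SOURCE B (Python) =====
-- def _asterisk_forms(hostname):
--     if not hostname:
--         return ["*"]
--     _joined, wild = _suffix_forms(hostname.split("."))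
--     return [hostname] + wild + ["*"]
--
--
-- def _suffix_forms(parts):
--     # Recursively returns (".".join(parts), wildcard forms for every proper suffix,
--     # longest first), so each suffix string is built once instead of re-joined per index.
--     if len(parts) == 1:
--         return parts[0], []
--     suffix, wild = _suffix_forms(parts[1:])
--     return parts[0] + "." + suffix, ["*." + suffix] + wild
-- ===== Notes on version B (the rewrite author's own statement) =====
-- stated objective: alternative
-- what changed: Replaces the index loop that re-joins parts[i:] for every i with a structural recursion on the label list that threads the running suffix string, so each wildcard form is built from the previously built suffix.
import Mathlib
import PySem

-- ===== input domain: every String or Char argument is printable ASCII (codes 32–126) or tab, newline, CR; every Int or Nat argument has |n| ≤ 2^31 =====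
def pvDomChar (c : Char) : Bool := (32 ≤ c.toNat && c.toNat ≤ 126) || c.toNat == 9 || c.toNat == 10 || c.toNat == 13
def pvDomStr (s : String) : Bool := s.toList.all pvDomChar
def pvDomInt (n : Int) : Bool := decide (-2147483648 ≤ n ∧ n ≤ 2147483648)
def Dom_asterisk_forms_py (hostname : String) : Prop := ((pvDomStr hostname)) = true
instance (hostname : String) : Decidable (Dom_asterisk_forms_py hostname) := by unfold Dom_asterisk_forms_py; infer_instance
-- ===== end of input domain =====

-- B replaces the per-index re-join of parts[i:] with one structural recursion threading the running suffix; same values, different decomposition.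

-- ===== PORT A =====
def asterisk_forms_py (hostname : String) : List String :=
  if hostname = "" then ["*"]
  else
    let parts := (PySem.Str.split? hostname ".").getD []  -- separator "." ≠ "", so split? is always `some`
    let forms : List String := [hostname]
    let forms := (PySem.List.pyRange 1 (parts.length : Int) 1).foldl
      (fun forms i =>
        forms ++ ["*." ++ PySem.Str.join "." (PySem.List.slice parts (some i) none)]) forms
    forms ++ ["*"]

-- ===== PORT B =====
-- port of Source B's _suffix_forms (base [] unreachable from _asterisk_forms: split? never yields [])
def pvSuffixForms : List String → String × List String
  | [] => ("", [])
  | [p] => (p, [])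
  | p :: q :: rest =>
    let sw := pvSuffixForms (q :: rest)
    (p ++ "." ++ sw.1, ("*." ++ sw.1) :: sw.2)

def asterisk_forms_py_alt (hostname : String) : List String :=
  if hostname = "" then ["*"]
  else
    let parts := (PySem.Str.split? hostname ".").getD []
    [hostname] ++ (pvSuffixForms parts).2 ++ ["*"]

-- ===== PRECONDITION & SPEC =====
def Spec_asterisk_forms_py (hostname : String) (out : List String) : Prop := out = asterisk_forms_py_alt hostname
instance (hostname : String) (out : List String) : Decidable (Spec_asterisk_forms_py hostname out) := by unfold Spec_asterisk_forms_py; infer_instance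

-- ===== CLAIM (what is proved, stated in full; the proofs are below) =====
def Claim_equal_asterisk_forms_py : Prop := ∀ (hostname : String), Dom_asterisk_forms_py hostname → Spec_asterisk_forms_py hostname (asterisk_forms_py hostname)

-- ===== LEMMAS AND PROOFS =====

-- the first component of pvSuffixForms is ".".join(parts)
theorem pvSuffixForms_fst : ∀ (parts : List String), parts ≠ [] →
    (pvSuffixForms parts).1 = PySem.Str.join "." parts
  | [], h => absurd rfl h
  | [p], _ => by
      apply String.toList_inj.mp
      simp [pvSuffixForms, PySem.Str.toList_join, PySem.Chars.join_singleton]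
  | p :: q :: rest, _ => by
      have ih := pvSuffixForms_fst (q :: rest) (by simp)
      apply String.toList_inj.mp
      simp [pvSuffixForms, ih, PySem.Str.toList_join, PySem.Chars.join_cons_cons]

-- the second component is exactly the list of "*." ++ join of each proper suffix
theorem pvSuffixForms_snd : ∀ (parts : List String),
    (List.range (parts.length - 1)).map
      (fun k => "*." ++ PySem.Str.join "." (parts.drop (1 + k))) = (pvSuffixForms parts).2
  | [] => by simp [pvSuffixForms]
  | [p] => by simp [pvSuffixForms]
  | p :: q :: rest => by
      have ih := pvSuffixForms_snd (q :: rest)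
      have hfst := pvSuffixForms_fst (q :: rest) (by simp)
      have hlen : (p :: q :: rest).length - 1 = (q :: rest).length - 1 + 1 := by simp
      rw [hlen, List.range_succ_eq_map]
      simp only [List.map_cons, List.map_map]
      rw [show (1 : ℕ) + 0 = 1 from rfl]
      refine congrArg₂ _ ?_ ?_
      · simp [hfst]
      · rw [← ih]
        refine List.map_congr_left fun k _ => ?_
        simp only [Function.comp_apply]
        congr 2

theorem asterisk_forms_py_spec : Claim_equal_asterisk_forms_py := by
  intro hostname _
  unfold Spec_asterisk_forms_py asterisk_forms_py asterisk_forms_py_alt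
  by_cases h : hostname = ""
  · simp [h]
  · simp only [h, ite_false]
    set parts := (PySem.Str.split? hostname ".").getD [] with hp
    rw [PySem.List.foldl_append_singleton_eq_map]
    congr 1
    congr 1
    rw [← pvSuffixForms_snd parts]
    rw [PySem.List.pyRange_one, List.map_map]
    have hcast : ((parts.length : Int) - 1).toNat = parts.length - 1 := by omega
    rw [hcast]
    refine List.map_congr_left fun k hk => ?_
    simp only [Function.comp_apply]
    congr 1
    have : (1 : Int) + (k : Int) = ((1 + k : ℕ) : Int) := by push_cast; ring
    rw [this, PySem.List.slice_from_natCast]
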